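-- pv_equiv track=rewrite | github.com/Ronelc/Intro | ex2/largest_and_smallest.py | largest_and_smallest
-- ===== SOURCE A (Python) =====
-- def largest_and_smallest(num1, num2, num3):
--     max_val = num1
--     min_val  = num2
--     a = [num1,num2,num3]
--     for i in a:
--         if i>max_val:
--             max_val = i
--         elif i< min_val:
--             min_val = i
--     return max_val, min_val
-- ===== SOURCE B (Python) =====
-- def largest_and_smallest(num1, num2, num3):
--     s = sorted([num1, num2, num3])
--     return s[2], s[0]
-- ===== Notes on version B (the rewrite author's own statement) =====
-- stated objective: simpler
-- what changed: Replaces the running max/min scan with one sorted() call over the three values, reading the largest and smallest off the ends of the sorted list.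
import Mathlib
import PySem

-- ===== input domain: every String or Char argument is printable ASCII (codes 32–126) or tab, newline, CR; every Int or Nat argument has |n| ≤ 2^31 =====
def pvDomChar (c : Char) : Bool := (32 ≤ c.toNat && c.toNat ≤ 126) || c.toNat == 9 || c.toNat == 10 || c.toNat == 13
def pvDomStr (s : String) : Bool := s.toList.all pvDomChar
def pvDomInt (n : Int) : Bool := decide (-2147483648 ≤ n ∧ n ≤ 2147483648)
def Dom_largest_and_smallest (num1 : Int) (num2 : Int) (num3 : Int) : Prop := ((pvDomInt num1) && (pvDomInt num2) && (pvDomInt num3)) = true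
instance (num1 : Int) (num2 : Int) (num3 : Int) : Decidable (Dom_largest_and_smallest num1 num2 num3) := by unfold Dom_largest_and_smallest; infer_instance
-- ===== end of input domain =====

-- B replaces A's running max/min scan with one sort of the three values, reading the extremes off the ends (objective: simpler).


-- ===== PORT A =====
-- loop "for i in a" with running (max_val, min_val), branches in A's order
def largest_and_smallest (num1 : Int) (num2 : Int) (num3 : Int) : Int × Int :=
  let a := [num1, num2, num3]
  a.foldl (fun (st : Int × Int) i =>
    if i > st.1 then (i, st.2)
    else if i < st.2 then (st.1, i)
    else st) (num1, num2)

-- ===== PORT B =====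
-- s = sorted([num1, num2, num3]); return s[2], s[0]  (indices 2 and 0 are in range on the 3-element list, so pyGetD is exact)
def largest_and_smallest_alt (num1 : Int) (num2 : Int) (num3 : Int) : Int × Int :=
  let s := PySem.List.sorted [num1, num2, num3] id false
  (PySem.List.pyGetD s 2 0, PySem.List.pyGetD s 0 0)

-- ===== PRECONDITION & SPEC =====
def Spec_largest_and_smallest (num1 : Int) (num2 : Int) (num3 : Int) (out : Int × Int) : Prop := out = largest_and_smallest_alt num1 num2 num3
instance (num1 : Int) (num2 : Int) (num3 : Int) (out : Int × Int) : Decidable (Spec_largest_and_smallest num1 num2 num3 out) := by unfold Spec_largest_and_smallest; infer_instance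

-- ===== CLAIM (what is proved, stated in full; the proofs are below) =====
def Claim_equal_largest_and_smallest : Prop := ∀ (num1 : Int) (num2 : Int) (num3 : Int), Dom_largest_and_smallest num1 num2 num3 → Spec_largest_and_smallest num1 num2 num3 (largest_and_smallest num1 num2 num3)

-- ===== LEMMAS AND PROOFS =====
theorem insertBy_nil (f : Int → Int → Bool) (x : Int) : PySem.List.insertBy f x [] = [x] := rfl

theorem insertBy_cons (f : Int → Int → Bool) (x y : Int) (ys : List Int) :
    PySem.List.insertBy f x (y :: ys) = if f x y then x :: y :: ys else y :: PySem.List.insertBy f x ys := rfl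

-- ===== VERDICT (by name: the statement is the Claim_ definition above) =====
theorem largest_and_smallest_spec : Claim_equal_largest_and_smallest := by
  intro n1 n2 n3 _
  unfold Spec_largest_and_smallest largest_and_smallest largest_and_smallest_alt
  simp only [List.foldl, PySem.List.sorted, insertBy_nil, insertBy_cons]
  split_ifs <;>
    simp_all [insertBy_nil, insertBy_cons, PySem.List.pyGetD, PySem.List.pyGet?,
      PySem.List.pyIdx?] <;>
    split_ifs <;> simp_all <;> omega
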